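-- pv_equiv track=rewrite | github.com/JaisonST/PartionsPython | pt.py | m7
-- ===== SOURCE A (Python) =====
-- def m7(li):
-- 	rep_check = []
-- 	for i in li:
-- 		if i % 7 == 1 or i % 7 == 2 or i % 7 == 4:
-- 			if i in rep_check:
-- 				return False
-- 			rep_check.append(i)
-- 		else:
-- 			return False
-- 	return True
-- ===== SOURCE B (Python) =====
-- def m7(li):
--     return all(i % 7 in (1, 2, 4) for i in li) and len(set(li)) == len(li)
-- ===== Notes on version B (the rewrite author's own statement) =====
-- stated objective: simpler
-- what changed: Replaces the early-returning loop that maintains a growing 'seen' list (with a linear membership scan per element) by two aggregate checks: an all() over residues mod 7 and a set-cardinality comparison for distinctness.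
import Mathlib
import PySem

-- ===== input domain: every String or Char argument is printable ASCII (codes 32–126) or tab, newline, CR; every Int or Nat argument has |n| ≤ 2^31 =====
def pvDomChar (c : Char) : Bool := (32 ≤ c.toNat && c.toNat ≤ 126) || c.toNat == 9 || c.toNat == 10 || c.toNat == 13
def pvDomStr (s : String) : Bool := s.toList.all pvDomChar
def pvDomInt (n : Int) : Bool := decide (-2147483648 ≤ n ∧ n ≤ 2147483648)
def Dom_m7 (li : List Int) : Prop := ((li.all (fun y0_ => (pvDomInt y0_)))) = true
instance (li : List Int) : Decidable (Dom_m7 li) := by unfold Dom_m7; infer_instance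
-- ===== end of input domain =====

-- B replaces A's single early-returning loop with a growing 'seen' list by two aggregate
-- checks (all residues mod 7 valid; set-cardinality equals length); objective: simpler.

-- ===== PORT A =====
-- the for-loop with its accumulating rep_check list and early returns
def m7Loop (rep : List Int) : List Int → Bool
  | [] => true
  | i :: t =>
    if PySem.Int.mod i 7 = 1 ∨ PySem.Int.mod i 7 = 2 ∨ PySem.Int.mod i 7 = 4 then
      if i ∈ rep then false
      else m7Loop (rep ++ [i]) t
    else false

def m7 (li : List Int) : Bool := m7Loop [] li

-- ===== PORT B =====
def m7_alt (li : List Int) : Bool :=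
  (li.all fun i =>
      decide (PySem.Int.mod i 7 = 1 ∨ PySem.Int.mod i 7 = 2 ∨ PySem.Int.mod i 7 = 4))
    && ((PySem.Set.ofList li).length == li.length)

-- ===== PRECONDITION & SPEC =====
def Spec_m7 (li : List Int) (out : Bool) : Prop := out = m7_alt li
instance (li : List Int) (out : Bool) : Decidable (Spec_m7 li out) := by unfold Spec_m7; infer_instance

-- ===== CLAIM (what is proved, stated in full; the proofs are below) =====
def Claim_equal_m7 : Prop := ∀ (li : List Int), Dom_m7 li → Spec_m7 li (m7 li)

-- ===== LEMMAS AND PROOFS =====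

def pvValid (i : Int) : Prop :=
  PySem.Int.mod i 7 = 1 ∨ PySem.Int.mod i 7 = 2 ∨ PySem.Int.mod i 7 = 4

theorem m7Loop_true_iff (li : List Int) : ∀ (rep : List Int),
    m7Loop rep li = true ↔
      ((∀ i ∈ li, pvValid i) ∧ li.Nodup ∧ ∀ x ∈ li, x ∉ rep) := by
  induction li with
  | nil => intro rep; simp [m7Loop]
  | cons i t ih =>
    intro rep
    simp [m7Loop, ih, pvValid, List.nodup_cons, not_or]
    constructor
    · rintro ⟨hv, hm, hall, hnd, hdisj⟩
      exact ⟨⟨hv, hall⟩, ⟨fun hit => ((hdisj i hit).2) rfl, hnd⟩, hm,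
        fun x hx => (hdisj x hx).1⟩
    · rintro ⟨⟨hv, hall⟩, ⟨hnit, hnd⟩, hm, hdisj⟩
      exact ⟨hv, hm, hall, hnd, fun x hx => ⟨hdisj x hx, fun he => hnit (he ▸ hx)⟩⟩

theorem ofList_sublist (li : List Int) : (PySem.Set.ofList li).Sublist li := by
  induction li with
  | nil => simp [PySem.Set.ofList]
  | cons x t ih =>
    rw [PySem.Set.ofList_cons]
    have hd : PySem.Set.discard (PySem.Set.ofList t) x
        = (PySem.Set.ofList t).filter (fun y => !(y == x)) := by
      simp [PySem.Set.discard]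
    exact List.Sublist.cons₂ x (by rw [hd]; exact (List.filter_sublist).trans ih)

theorem set_len_eq_iff (li : List Int) :
    ((PySem.Set.ofList li).length == li.length) = decide li.Nodup := by
  by_cases h : li.Nodup
  · simp [PySem.Set.ofList_eq_self_of_nodup li h, h]
  · simp [h]
    intro he
    exact h ((List.Sublist.eq_of_length (ofList_sublist li) he) ▸ PySem.Set.nodup_ofList li)

theorem m7_alt_true_iff (li : List Int) :
    m7_alt li = true ↔ ((∀ i ∈ li, pvValid i) ∧ li.Nodup) := by
  unfold m7_alt
  rw [set_len_eq_iff]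
  simp [pvValid]

-- ===== VERDICT (by name: the statement is the Claim_ definition above) =====
theorem m7_spec : Claim_equal_m7 := by
  intro li _
  unfold Spec_m7 m7
  rw [Bool.eq_iff_iff, m7Loop_true_iff, m7_alt_true_iff]
  simp
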